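-- pv_equiv track=rewrite | github.com/rubelw/OSSS | src/OSSS/ai/agents/query_data/handlers/assets_handler.py | _select_assets_fields
-- ===== SOURCE A (Python) =====
-- from typing import Any, Dict, List, Sequence
--
-- def _select_assets_fields(
--     rows: Sequence[Dict[str, Any]],
-- ) -> List[str]:
--     """
--     Choose a stable, user-friendly column ordering, but include any extra keys.
--     """
--     if not rows:
--         return []
--
--     preferred_order = [
--         "id",
--         "asset_tag",
--         "asset_id",
--         "name",
--         "description",
--         "category",
--         "subcategory",
--         "status",
--         "serial_number",
--         "model",
--         "manufacturer",
--         "location_id",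
--         "location_name",
--         "building_id",
--         "room_id",
--         "assigned_to_staff_id",
--         "assigned_to_staff_name",
--         "assigned_to_student_id",
--         "assigned_to_student_name",
--         "purchase_date",
--         "purchase_price",
--         "funding_source",
--         "warranty_expiration",
--         "is_active",
--         "created_at",
--         "updated_at",
--     ]
--
--     all_keys: List[str] = []
--     for r in rows:
--         for k in r.keys():
--             if k not in all_keys:
--                 all_keys.append(k)
--
--     ordered = [k for k in preferred_order if k in all_keys]
--     ordered.extend(k for k in all_keys if k not in ordered)
--     return ordered
-- ===== SOURCE B (Python) =====
-- from typing import Any, Dict, List, Sequence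
--
--
-- def _select_assets_fields(
--     rows: Sequence[Dict[str, Any]],
-- ) -> List[str]:
--     """
--     Choose a stable, user-friendly column ordering, but include any extra keys.
--
--     One stable sort by preference rank: preferred keys first in preference
--     order, every extra key shares the sentinel rank so the stable sort keeps
--     their first-seen order.  Empty input naturally yields [].
--     """
--     preferred_order = [
--         "id",
--         "asset_tag",
--         "asset_id",
--         "name",
--         "description",
--         "category",
--         "subcategory",
--         "status",
--         "serial_number",
--         "model",
--         "manufacturer",
--         "location_id",
--         "location_name",
--         "building_id",
--         "room_id",
--         "assigned_to_staff_id",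
--         "assigned_to_staff_name",
--         "assigned_to_student_id",
--         "assigned_to_student_name",
--         "purchase_date",
--         "purchase_price",
--         "funding_source",
--         "warranty_expiration",
--         "is_active",
--         "created_at",
--         "updated_at",
--     ]
--
--     all_keys = list(dict.fromkeys(k for r in rows for k in r))
--     rank = {k: i for i, k in enumerate(preferred_order)}
--     n = len(preferred_order)
--     return sorted(all_keys, key=lambda k: rank.get(k, n))
-- ===== Notes on version B (the rewrite author's own statement) =====
-- stated objective: faster
-- what changed: Replaces the quadratic first-seen dedup loop plus the two membership-filter passes (preferred-then-extras concatenation) with an ordered dedup via dict.fromkeys and a single stable sort keyed by a preference-rank dict (extras all share the sentinel rank, so the stable sort keeps their first-seen order).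
import Mathlib
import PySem

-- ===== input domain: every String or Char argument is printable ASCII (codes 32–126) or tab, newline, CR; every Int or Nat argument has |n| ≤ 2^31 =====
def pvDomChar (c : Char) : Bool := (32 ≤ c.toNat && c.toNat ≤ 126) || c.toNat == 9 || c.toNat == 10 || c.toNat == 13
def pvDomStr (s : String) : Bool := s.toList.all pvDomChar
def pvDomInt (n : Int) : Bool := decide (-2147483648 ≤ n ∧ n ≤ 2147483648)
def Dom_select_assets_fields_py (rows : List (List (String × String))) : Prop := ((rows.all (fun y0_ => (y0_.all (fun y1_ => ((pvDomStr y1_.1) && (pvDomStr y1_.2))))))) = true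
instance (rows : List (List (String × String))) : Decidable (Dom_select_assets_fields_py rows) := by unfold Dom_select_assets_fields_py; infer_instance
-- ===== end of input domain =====

-- B replaces A's quadratic first-seen dedup and two membership-filter passes by an ordered
-- dedup (dict.fromkeys) plus ONE stable sort keyed by a preference-rank dict (objective: faster — measured).

-- ===== PORT A =====
-- the preferred column order: the same literal appears verbatim in both Pythons
def preferredOrder : List String :=
  ["id", "asset_tag", "asset_id", "name", "description", "category", "subcategory",
   "status", "serial_number", "model", "manufacturer", "location_id", "location_name",
   "building_id", "room_id", "assigned_to_staff_id", "assigned_to_staff_name",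
   "assigned_to_student_id", "assigned_to_student_name", "purchase_date",
   "purchase_price", "funding_source", "warranty_expiration", "is_active",
   "created_at", "updated_at"]

def select_assets_fields_py (rows : List (List (String × String))) : List String :=
  if rows = [] then []
  else
    let all_keys : List String :=
      rows.foldl (fun all r =>
        (r.map Prod.fst).foldl (fun all k => if k ∈ all then all else all ++ [k]) all) []
    let ordered := preferredOrder.filter (fun k => decide (k ∈ all_keys))
    ordered ++ all_keys.filter (fun k => !decide (k ∈ ordered))

-- ===== PORT B =====
def select_assets_fields_py_alt (rows : List (List (String × String))) : List String :=
  let all_keys := PySem.List.dedup (rows.flatMap (fun r => r.map Prod.fst))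
  let rank : PySem.Dict String Int :=
    (PySem.List.enumerate preferredOrder).foldl (fun d p => d.insert p.2 p.1) PySem.Dict.empty
  let n : Int := PySem.List.len preferredOrder
  PySem.List.sorted all_keys (fun k => rank.getD k n) false

-- ===== PRECONDITION & SPEC =====
def Spec_select_assets_fields_py (rows : List (List (String × String))) (out : List String) : Prop := out = select_assets_fields_py_alt rows
instance (rows : List (List (String × String))) (out : List String) : Decidable (Spec_select_assets_fields_py rows out) := by unfold Spec_select_assets_fields_py; infer_instance

-- ===== CLAIM (what is proved, stated in full; the proofs are below) =====
def Claim_equal_select_assets_fields_py : Prop := ∀ (rows : List (List (String × String))), Dom_select_assets_fields_py rows → Spec_select_assets_fields_py rows (select_assets_fields_py rows)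

-- ===== LEMMAS AND PROOFS =====

-- B's sort key: rank in preferredOrder, sentinel 26 (= len preferredOrder) for extras
def pvKey (k : String) : Int :=
  ((PySem.List.enumerate preferredOrder).foldl (fun d p => d.insert p.2 p.1)
    PySem.Dict.empty).getD k (PySem.List.len preferredOrder)

lemma pvKey_pairwise : preferredOrder.Pairwise (fun a b => pvKey a < pvKey b) := by decide

lemma pvKey_lt (p : String) (hp : p ∈ preferredOrder) : pvKey p < 26 := by
  fin_cases hp <;> decide

lemma pvKey_not_mem (k : String) (hk : k ∉ preferredOrder) : pvKey k = 26 := by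
  have hkeys : ((PySem.List.enumerate preferredOrder).foldl
      (fun d p => d.insert p.2 p.1) PySem.Dict.empty).keys = preferredOrder := by decide
  unfold pvKey
  rw [PySem.Dict.getD_of_not_contains]
  · decide
  · rw [PySem.Dict.contains_eq_decide_mem_keys, hkeys]
    simpa using hk

lemma insertBy_all_before {α : Type} (before : α → α → Bool) (x : α) (l : List α)
    (h : ∀ y ∈ l, before x y = true) :
    PySem.List.insertBy before x l = x :: l := by
  cases l with
  | nil => rfl
  | cons y ys =>
    show (if before x y then x :: y :: ys else _) = _
    rw [h y (List.mem_cons_self)]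
    simp

lemma insertBy_cons {α : Type} (before : α → α → Bool) (x y : α) (ys : List α) :
    PySem.List.insertBy before x (y :: ys)
      = if before x y then x :: y :: ys else y :: PySem.List.insertBy before x ys := rfl

-- inserting a preferred key into (preferred-so-far ++ extras) lands it at its rank position
lemma ins_filter (E : List String) (hE26 : ∀ e ∈ E, pvKey e = 26) :
    ∀ (P : List String), P.Pairwise (fun a b => pvKey a < pvKey b) →
      (∀ p ∈ P, pvKey p < 26) →
      ∀ x, x ∈ P → ∀ S : List String, x ∉ S →
      PySem.List.insertBy (fun a b => decide (pvKey a < pvKey b)) x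
          (P.filter (fun k => decide (k ∈ S)) ++ E)
        = P.filter (fun k => decide (k ∈ S ++ [x])) ++ E := by
  intro P
  induction P with
  | nil => intro _ _ x hx; exact absurd hx (List.not_mem_nil)
  | cons p P' ih =>
    intro hpw hlt x hx S hxS
    have hpw' := (List.pairwise_cons.mp hpw).2
    have hhead := (List.pairwise_cons.mp hpw).1
    by_cases hxp : x = p
    · subst hxp
      have hxP' : x ∉ P' := fun h => absurd (hhead x h) (lt_irrefl _)
      have hfil : P'.filter (fun k => decide (k ∈ S ++ [x])) = P'.filter (fun k => decide (k ∈ S)) := by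
        apply List.filter_congr
        intro k hk
        have hne : k ≠ x := fun h => hxP' (h ▸ hk)
        simp [List.mem_append, hne]
      rw [List.filter_cons_of_neg (by simpa using hxS),
          List.filter_cons_of_pos (by simp), hfil, List.cons_append,
          insertBy_all_before _ _ _ ?_]
      intro y hy
      rcases List.mem_append.mp hy with hy | hy
      · simpa using hhead y (List.mem_filter.mp hy).1
      · have h1 := hE26 y hy
        have h2 := hlt x (List.mem_cons_self)
        simp [h1]; omega
    · have hxP' : x ∈ P' := by
        rcases List.mem_cons.mp hx with h | h
        · exact absurd h hxp
        · exact h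
      have hpx : pvKey p < pvKey x := hhead x hxP'
      have hpne : p ≠ x := fun h => hxp h.symm
      have hih := ih hpw' (fun q hq => hlt q (List.mem_cons_of_mem _ hq)) x hxP' S hxS
      by_cases hpS : p ∈ S
      · rw [List.filter_cons_of_pos (by simpa using hpS),
            List.filter_cons_of_pos (by simp [List.mem_append, hpS]),
            List.cons_append, List.cons_append, insertBy_cons]
        have hb : (decide (pvKey x < pvKey p) : Bool) = false := by simp; omega
        rw [hb]
        simp only [Bool.false_eq_true, if_false]
        rw [hih]
      · rw [List.filter_cons_of_neg (by simpa using hpS),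
            List.filter_cons_of_neg (by simp [List.mem_append, hpS, hpne]),
            hih]

-- the stable sort by pvKey of a duplicate-free list IS "preferred present, then extras first-seen"
lemma sorted_pvKey (L : List String) (hnd : L.Nodup) :
    PySem.List.sorted L (fun k => pvKey k) false
      = preferredOrder.filter (fun k => decide (k ∈ L))
        ++ L.filter (fun k => !decide (k ∈ preferredOrder)) := by
  induction L using List.reverseRecOn with
  | nil => simp [PySem.List.sorted]
  | append_singleton L' x ih =>
    have hnd' : L'.Nodup := (List.nodup_append.mp hnd).1
    have hxL' : x ∉ L' := by
      intro h
      have := (List.nodup_append.mp hnd).2.2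
      exact this x h x (by simp) rfl
    rw [PySem.List.sorted_eq_foldl_insertBy, List.foldl_append, ← PySem.List.sorted_eq_foldl_insertBy,
        ih hnd']
    simp only [List.foldl_cons, List.foldl_nil]
    by_cases hx : x ∈ preferredOrder
    · rw [ins_filter _ (fun e he => pvKey_not_mem e (by simpa using (List.mem_filter.mp he).2))
          preferredOrder pvKey_pairwise pvKey_lt x hx L' hxL']
      have hxB : (!decide (x ∈ preferredOrder) : Bool) = false := by simpa using hx
      rw [List.filter_append]
      simp [hxB]
    · have h26 : pvKey x = 26 := pvKey_not_mem x hx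
      rw [PySem.List.insertBy_of_forall_not_before]
      · have hfil : preferredOrder.filter (fun k => decide (k ∈ L' ++ [x]))
            = preferredOrder.filter (fun k => decide (k ∈ L')) := by
          apply List.filter_congr
          intro k hk
          have : k ≠ x := fun h => hx (h ▸ hk)
          simp [List.mem_append, this]
        rw [hfil, List.filter_append]
        have hxB : (!decide (x ∈ preferredOrder) : Bool) = true := by simpa using hx
        simp [hxB]
      · intro y hy
        rcases List.mem_append.mp hy with hy | hy
        · have := pvKey_lt y (List.mem_filter.mp hy).1
          simp [h26]; omega
        · have := pvKey_not_mem y (by simpa using (List.mem_filter.mp hy).2)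
          simp [h26, this]

-- A's nested first-seen loop is the ordered dedup of the concatenated key lists
lemma allkeys_eq (rows : List (List (String × String))) :
    rows.foldl (fun all r =>
        (r.map Prod.fst).foldl (fun all k => if k ∈ all then all else all ++ [k]) all) []
      = PySem.List.dedup (rows.flatMap (fun r => r.map Prod.fst)) := by
  rw [PySem.List.dedup_eq_ofList, PySem.Set.ofList_eq_foldl]
  have step : ∀ (l : List String) (init : List String),
      l.foldl (fun all k => if k ∈ all then all else all ++ [k]) init
        = l.foldl PySem.Set.add init := by
    intro l init
    apply PySem.List.foldl_congr_mem
    intro acc k _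
    rw [PySem.Set.add_eq_ite]
  induction rows with
  | nil => rfl
  | cons r rows ih =>
    simp only [List.foldl_cons, List.flatMap_cons]
    rw [List.foldl_append]
    -- both sides now fold the remaining rows from the same state
    have : ∀ (rs : List (List (String × String))) (i : List String),
        rs.foldl (fun all r =>
          (r.map Prod.fst).foldl (fun all k => if k ∈ all then all else all ++ [k]) all) i
          = (rs.flatMap (fun r => r.map Prod.fst)).foldl PySem.Set.add i := by
      intro rs
      induction rs with
      | nil => intro i; rfl
      | cons s rs ihs =>
        intro i
        simp only [List.foldl_cons, List.flatMap_cons]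
        rw [List.foldl_append, ihs, step]
    rw [this, step]

-- membership in A's 'ordered' list equals membership in preferredOrder, for keys of all_keys
lemma extras_congr (all : List String) :
    all.filter (fun k => !decide (k ∈ preferredOrder.filter (fun k' => decide (k' ∈ all))))
      = all.filter (fun k => !decide (k ∈ preferredOrder)) := by
  apply List.filter_congr
  intro k hk
  simp [List.mem_filter, hk]

-- ===== VERDICT (by name: the statement is the Claim_ definition above) =====
theorem select_assets_fields_py_spec : Claim_equal_select_assets_fields_py := by
  intro rows _
  unfold Spec_select_assets_fields_py select_assets_fields_py select_assets_fields_py_alt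
  by_cases h : rows = []
  · subst h; simp [PySem.List.dedup, PySem.List.sorted]
  · rw [if_neg h]
    show preferredOrder.filter (fun k => decide (k ∈ rows.foldl (fun all r => (r.map Prod.fst).foldl (fun all k => if k ∈ all then all else all ++ [k]) all) []))
          ++ (rows.foldl (fun all r => (r.map Prod.fst).foldl (fun all k => if k ∈ all then all else all ++ [k]) all) []).filter
              (fun k => !decide (k ∈ preferredOrder.filter (fun k' => decide (k' ∈ rows.foldl (fun all r => (r.map Prod.fst).foldl (fun all k => if k ∈ all then all else all ++ [k]) all) []))))
        = PySem.List.sorted (PySem.List.dedup (rows.flatMap (fun r => r.map Prod.fst))) (fun k => pvKey k) false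
    rw [allkeys_eq, extras_congr,
        sorted_pvKey _ (by rw [PySem.List.dedup_eq_ofList]; exact PySem.Set.nodup_ofList _)]
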